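-- pv_equiv track=rewrite | github.com/perfectblue/ctf-writeups | 2022/plaid-ctf-2022/flagsong/lib_generate.py | convert_to_diphones
-- ===== SOURCE A (Python) =====
-- from typing import List
--
-- vowels = '3AIOao{}'
--
-- dummy_vowel = '@'
--
-- dummy_consonant = 'h'
--
-- def convert_to_diphones(FLAG: str) -> List[str]:
--     diphones = []
--
--     # convert to CVCVCV...
--     diphone = ''
--     for i in FLAG:
--         if len(diphone) == 0:
--             if i in vowels:
--                 diphones.append(dummy_consonant + i)
--             else:
--                 diphone = i
--         else:
--             if i in vowels:
--                 diphones.append(diphone + i)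
--                 diphone = ''
--             else:
--                 diphones.append(diphone + dummy_vowel)
--                 diphone = i
--     if len(diphone) > 0:
--         diphones.append(diphone + dummy_vowel)
--
--     return diphones
-- ===== SOURCE B (Python) =====
-- from typing import List
--
-- vowels = '3AIOao{}'
-- dummy_vowel = '@'
-- dummy_consonant = 'h'
--
-- def convert_to_diphones(FLAG: str) -> List[str]:
--     diphones = []
--     i = 0
--     n = len(FLAG)
--     while i < n:
--         c = FLAG[i]
--         if c in vowels:
--             diphones.append(dummy_consonant + c)
--             i += 1
--         elif i + 1 < n and FLAG[i + 1] in vowels: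
--             diphones.append(c + FLAG[i + 1])
--             i += 2
--         else:
--             diphones.append(c + dummy_vowel)
--             i += 1
--     return diphones
-- ===== Notes on version B (the rewrite author's own statement) =====
-- stated objective: alternative
-- what changed: Replaced A's fold that carries a pending-consonant string plus an end-of-loop flush with a stateless index/lookahead loop that inspects the next character and advances by 1 or 2.
import Mathlib
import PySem

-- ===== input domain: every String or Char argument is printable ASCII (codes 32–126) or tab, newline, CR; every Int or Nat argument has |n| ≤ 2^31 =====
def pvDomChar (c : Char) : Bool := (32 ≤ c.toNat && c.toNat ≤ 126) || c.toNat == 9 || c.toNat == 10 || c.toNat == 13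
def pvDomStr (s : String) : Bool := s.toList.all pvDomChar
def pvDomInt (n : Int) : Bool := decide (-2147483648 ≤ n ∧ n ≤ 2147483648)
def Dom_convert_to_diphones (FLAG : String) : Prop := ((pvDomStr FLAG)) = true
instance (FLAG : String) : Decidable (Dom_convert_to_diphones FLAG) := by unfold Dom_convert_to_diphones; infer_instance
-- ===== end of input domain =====

-- B replaces A's remembered-consonant state + end-of-loop flush by a stateless
-- index loop with one-character lookahead and variable stepping (objective: alternative).


-- ===== PORT A =====
-- 'i in vowels' for a single character: membership in the characters of "3AIOao{}"
def pvIsVowel (c : Char) : Bool := ['3','A','I','O','a','o','{','}'].contains c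

-- the for-loop, carrying Python's (diphones, diphone) state; the trailing
-- 'if len(diphone) > 0' flush is the [] case (strings handled as their char lists)
def pvGoA (l : List Char) (diphones : List String) (diphone : List Char) : List String :=
  match l with
  | [] => if diphone.length > 0 then diphones ++ [String.ofList (diphone ++ ['@'])] else diphones
  | i :: rest =>
    if diphone.length = 0 then
      if pvIsVowel i then pvGoA rest (diphones ++ [String.ofList ['h', i]]) diphone
      else pvGoA rest diphones [i]
    else
      if pvIsVowel i then pvGoA rest (diphones ++ [String.ofList (diphone ++ [i])]) []
      else pvGoA rest (diphones ++ [String.ofList (diphone ++ ['@'])]) [i]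

def convert_to_diphones (FLAG : String) : List String :=
  pvGoA FLAG.toList [] []

-- ===== PORT B =====
-- stateless index loop with lookahead: vowel → 'h'+c, step 1; consonant followed
-- by a vowel → pair, step 2; otherwise c+'@', step 1
def pvGoB : List Char → List String
  | [] => []
  | [i] =>
    if pvIsVowel i then [String.ofList ['h', i]] else [String.ofList [i, '@']]
  | i :: j :: rest' =>
    if pvIsVowel i then String.ofList ['h', i] :: pvGoB (j :: rest')
    else if pvIsVowel j then String.ofList [i, j] :: pvGoB rest'
    else String.ofList [i, '@'] :: pvGoB (j :: rest')

def convert_to_diphones_alt (FLAG : String) : List String :=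
  pvGoB FLAG.toList

-- ===== PRECONDITION & SPEC =====
def Spec_convert_to_diphones (FLAG : String) (out : List String) : Prop := out = convert_to_diphones_alt FLAG
instance (FLAG : String) (out : List String) : Decidable (Spec_convert_to_diphones FLAG out) := by unfold Spec_convert_to_diphones; infer_instance

-- ===== CLAIM (what is proved, stated in full; the proofs are below) =====
def Claim_equal_convert_to_diphones : Prop := ∀ (FLAG : String), Dom_convert_to_diphones FLAG → Spec_convert_to_diphones FLAG (convert_to_diphones FLAG)

-- ===== LEMMAS AND PROOFS =====

-- loop invariant: with empty pending state A's loop computes B's result on the rest;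
-- with a pending consonant c it computes B's result on c :: rest
-- one-step unfolding of pvGoB at a vowel, independent of the tail's shape
theorem pvGoB_vowel (i : Char) (rest : List Char) (hv : pvIsVowel i = true) :
    pvGoB (i :: rest) = String.ofList ['h', i] :: pvGoB rest := by
  cases rest <;> simp [pvGoB, hv]

theorem pvGoA_eq (l : List Char) :
    (∀ ds, pvGoA l ds [] = ds ++ pvGoB l) ∧
    (∀ ds c, pvIsVowel c = false → pvGoA l ds [c] = ds ++ pvGoB (c :: l)) := by
  induction l with
  | nil =>
    constructor
    · intro ds; simp [pvGoA, pvGoB]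
    · intro ds c hc; simp [pvGoA, pvGoB, hc]
  | cons i rest ih =>
    obtain ⟨ihP, ihQ⟩ := ih
    constructor
    · intro ds
      by_cases hv : pvIsVowel i
      · simp [pvGoA, hv, ihP, pvGoB_vowel i rest hv]
      · simp only [Bool.not_eq_true] at hv
        simp [pvGoA, hv, ihQ ds i hv]
    · intro ds c hc
      by_cases hv : pvIsVowel i
      · simp [pvGoA, pvGoB, hv, hc, ihP]
      · simp only [Bool.not_eq_true] at hv
        simp [pvGoA, pvGoB, hv, hc, ihQ]

-- ===== VERDICT (by name: the statement is the Claim_ definition above) =====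
theorem convert_to_diphones_spec : Claim_equal_convert_to_diphones := by
  intro FLAG _
  unfold Spec_convert_to_diphones convert_to_diphones convert_to_diphones_alt
  simpa using (pvGoA_eq FLAG.toList).1 []
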